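-- pv_equiv track=rewrite | github.com/Eagle57f/NSI | Python/Binaire et héxadécimal et UTF-8/exos_bonus.py | ASCII_phrase
-- ===== SOURCE A (Python) =====
-- def ASCII_phrase(phrase):
--     bina=[]
--     phrase = phrase.split(" ")
--     for mot in phrase:
--         for lettre in mot:
--             x=[l for l in bin(ord(lettre))[2:]]
--             bina.extend("".join(x))
--
--         bina.append(" ")
--
--
--     return "".join(bina)[:-1]
-- ===== SOURCE B (Python) =====
-- def ASCII_phrase(phrase):
--     # single pass: a space maps to itself, any other char to its binary ASCII code
--     return "".join(" " if c == " " else bin(ord(c))[2:] for c in phrase)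
-- ===== Notes on version B (the rewrite author's own statement) =====
-- stated objective: simpler
-- what changed: B drops A's split-into-words double loop with trailing-space append and [:-1] slice, and instead makes one flat pass mapping each character (space stays a space, others to bin(ord(c))[2:]) joined into one string.
import Mathlib
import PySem

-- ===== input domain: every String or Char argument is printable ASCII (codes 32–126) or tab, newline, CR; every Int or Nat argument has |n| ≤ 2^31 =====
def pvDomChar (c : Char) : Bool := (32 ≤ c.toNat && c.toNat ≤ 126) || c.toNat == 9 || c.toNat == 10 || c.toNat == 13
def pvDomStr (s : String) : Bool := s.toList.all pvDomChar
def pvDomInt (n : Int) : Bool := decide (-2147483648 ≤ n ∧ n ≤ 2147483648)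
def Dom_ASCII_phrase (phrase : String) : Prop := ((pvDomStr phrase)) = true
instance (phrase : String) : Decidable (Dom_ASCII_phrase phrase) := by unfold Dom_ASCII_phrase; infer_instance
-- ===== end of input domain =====

-- B replaces A's split-into-words nested loops (+ trailing-space append and [:-1]) by one flat
-- per-character pass; same output, simpler code ('simpler', no speed claim).

-- ===== PORT A =====
def ASCII_phrase (phrase : String) : String :=
  let bina : List Char := []
  let phrase' := PySem.Chars.splitOn phrase.toList [' ']          -- phrase.split(" ")
  let bina := phrase'.foldl (fun bina mot =>
      let bina := mot.foldl (fun bina lettre =>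
          -- x = [l for l in bin(ord(lettre))[2:]]; bina.extend("".join(x))
          let x := PySem.List.slice (PySem.Int.toBinChars0b (lettre.toNat : Int)) (some 2) none
          bina ++ x) bina
      bina ++ [' ']) bina                                          -- bina.append(" ")
  String.ofList (PySem.List.slice bina none (some (-1)))           -- "".join(bina)[:-1]

-- ===== PORT B =====
def ASCII_phrase_alt (phrase : String) : String :=
  String.ofList (phrase.toList.flatMap
    (fun c => if c = ' ' then [' '] else PySem.Int.toBinChars (c.toNat : Int)))

-- ===== PRECONDITION & SPEC =====
def Spec_ASCII_phrase (phrase : String) (out : String) : Prop := out = ASCII_phrase_alt phrase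
instance (phrase : String) (out : String) : Decidable (Spec_ASCII_phrase phrase out) := by unfold Spec_ASCII_phrase; infer_instance

-- ===== CLAIM (what is proved, stated in full; the proofs are below) =====
def Claim_equal_ASCII_phrase : Prop := ∀ (phrase : String), Dom_ASCII_phrase phrase → Spec_ASCII_phrase phrase (ASCII_phrase phrase)

-- ===== LEMMAS AND PROOFS =====

-- the per-character emission of B, on the list side
def pvEmit (c : Char) : List Char :=
  if c = ' ' then [' '] else PySem.Int.toBinChars (c.toNat : Int)

-- A's digits for one letter: bin(ord(c))[2:] = format(ord(c), 'b')
lemma pvDigits_eq (c : Char) :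
    PySem.List.slice (PySem.Int.toBinChars0b (c.toNat : Int)) (some 2) none
      = PySem.Int.toBinChars (c.toNat : Int) := by
  have h0 : ¬((c.toNat : Int) < 0) := by omega
  rw [PySem.List.slice_from _ (by omega)]
  simp [PySem.Int.toBinChars0b, PySem.Int.toBinChars, h0]

-- invariant of splitOn.go for sep = [' ']: flat-mapping A's per-word emission over the
-- words produced from state (l, cur, acc) yields acc's part, the open word's digits,
-- B's pass over l, and one trailing space
lemma pvGo_inv (fuel : Nat) :
    ∀ (l cur : List Char) (acc : List (List Char)), l.length ≤ fuel →
      (PySem.Chars.splitOn.go [' '] fuel l cur acc).flatMap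
          (fun mot => mot.flatMap (fun c => PySem.Int.toBinChars (c.toNat : Int)) ++ [' '])
        = acc.reverse.flatMap
            (fun mot => mot.flatMap (fun c => PySem.Int.toBinChars (c.toNat : Int)) ++ [' '])
          ++ cur.reverse.flatMap (fun c => PySem.Int.toBinChars (c.toNat : Int))
          ++ l.flatMap pvEmit ++ [' '] := by
  induction fuel with
  | zero =>
      intro l cur acc h
      have hl : l = [] := by cases l <;> simp_all
      subst hl
      simp [PySem.Chars.splitOn.go]
  | succ f ih =>
      intro l cur acc h
      cases l with
      | nil => simp [PySem.Chars.splitOn.go]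
      | cons c rest =>
          by_cases hc : c = ' '
          · subst hc
            have : PySem.Chars.splitOn.go [' '] (f+1) (' ' :: rest) cur acc
                = PySem.Chars.splitOn.go [' '] f rest [] (cur.reverse :: acc) := by
              simp [PySem.Chars.splitOn.go, List.isPrefixOf]
            rw [this, ih rest [] (cur.reverse :: acc) (by simpa using h)]
            simp [pvEmit]
          · have : PySem.Chars.splitOn.go [' '] (f+1) (c :: rest) cur acc
                = PySem.Chars.splitOn.go [' '] f rest (c :: cur) acc := by
              simp [PySem.Chars.splitOn.go, List.isPrefixOf]
              intro h; exact absurd h.symm hc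
            rw [this, ih rest (c :: cur) acc (by simpa using h)]
            simp [pvEmit, hc]

-- dropping the trailing space: xs[:-1] on l ++ [' ']
lemma pvSlice_drop_last (l : List Char) (x : Char) :
    PySem.List.slice (l ++ [x]) none (some (-1)) = l := by
  simp [PySem.List.slice]

-- ===== VERDICT (by name: the statement is the Claim_ definition above) =====
theorem ASCII_phrase_spec : Claim_equal_ASCII_phrase := by
  intro phrase _
  show ASCII_phrase phrase = ASCII_phrase_alt phrase
  unfold ASCII_phrase ASCII_phrase_alt
  simp only [pvDigits_eq, PySem.List.foldl_append_eq_flatMap, List.append_assoc,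
    List.nil_append]
  have hsplit := pvGo_inv (phrase.toList.length + 1) phrase.toList [] [] (by omega)
  unfold PySem.Chars.splitOn
  rw [hsplit]
  simp only [List.reverse_nil, List.flatMap_nil, List.nil_append]
  rw [pvSlice_drop_last]
  rfl
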